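-- pv_equiv track=rewrite | github.com/madminjo/freefire | 9999999uhh.py | get_rank_name
-- ===== SOURCE A (Python) =====
-- def get_rank_name(rank_points):
--     rank_map = {
--         0: "Bronze", 1000: "Silver", 2000: "Gold",
--         3000: "Platinum", 4000: "Diamond",
--         5000: "Master", 6000: "Grandmaster"
--     }
--     for threshold, rank in sorted(rank_map.items(), reverse=True):
--         if rank_points >= threshold:
--             return rank
--     return "Unranked"
-- ===== SOURCE B (Python) =====
-- def get_rank_name(rank_points):
--     if rank_points < 0:
--         return "Unranked"
--     names = ["Bronze", "Silver", "Gold", "Platinum", "Diamond", "Master", "Grandmaster"]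
--     idx = rank_points // 1000
--     if idx > 6:
--         idx = 6
--     return names[idx]
-- ===== Notes on version B (the rewrite author's own statement) =====
-- stated objective: simpler
-- what changed: Replaced the descending threshold scan over a sorted dict with a closed-form band index rank_points // 1000 clamped to 6, indexing a name list directly.
import Mathlib
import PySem

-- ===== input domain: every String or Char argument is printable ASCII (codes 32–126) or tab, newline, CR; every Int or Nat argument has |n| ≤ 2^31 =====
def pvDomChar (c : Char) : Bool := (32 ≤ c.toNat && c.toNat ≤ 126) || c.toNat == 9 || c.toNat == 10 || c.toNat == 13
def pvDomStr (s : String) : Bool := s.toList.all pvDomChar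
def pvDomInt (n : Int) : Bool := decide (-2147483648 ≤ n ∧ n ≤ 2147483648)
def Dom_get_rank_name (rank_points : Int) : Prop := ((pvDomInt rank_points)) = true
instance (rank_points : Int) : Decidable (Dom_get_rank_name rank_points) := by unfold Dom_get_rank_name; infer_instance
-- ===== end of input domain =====

-- B replaces A's descending threshold scan by a closed-form band index (rank_points // 1000, clamped to 6); objective: simpler.

-- ===== PORT A =====
-- the for-loop with early return over the sorted items
def rankLoop : List (Int × String) → Int → String
  | [], _ => "Unranked"
  | (threshold, rank) :: rest, rank_points =>
      if rank_points ≥ threshold then rank else rankLoop rest rank_points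

def get_rank_name (rank_points : Int) : String :=
  let rank_map : PySem.Dict Int String := PySem.Dict.ofList
    [(0, "Bronze"), (1000, "Silver"), (2000, "Gold"),
     (3000, "Platinum"), (4000, "Diamond"),
     (5000, "Master"), (6000, "Grandmaster")]
  -- sorted(rank_map.items(), reverse=True): keys are distinct, so sorting the pairs by their first component is Python's tuple order
  rankLoop (PySem.List.sorted rank_map.items (fun kv => kv.1) true) rank_points

-- ===== PORT B =====
def get_rank_name_alt (rank_points : Int) : String :=
  if rank_points < 0 then "Unranked"
  else
    let names := ["Bronze", "Silver", "Gold", "Platinum", "Diamond", "Master", "Grandmaster"]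
    let idx := PySem.Int.floordiv rank_points 1000
    let idx := if idx > 6 then 6 else idx
    -- names[idx]: idx is provably in range here, so the default is never taken
    (PySem.List.pyGet? names idx).getD ""

-- ===== PRECONDITION & SPEC =====
def Spec_get_rank_name (rank_points : Int) (out : String) : Prop := out = get_rank_name_alt rank_points
instance (rank_points : Int) (out : String) : Decidable (Spec_get_rank_name rank_points out) := by unfold Spec_get_rank_name; infer_instance

-- ===== CLAIM (what is proved, stated in full; the proofs are below) =====
def Claim_equal_get_rank_name : Prop := ∀ (rank_points : Int), Dom_get_rank_name rank_points → Spec_get_rank_name rank_points (get_rank_name rank_points)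

-- ===== LEMMAS AND PROOFS =====

-- A's value, band by band
lemma getA (p : Int) :
    get_rank_name p =
      if p ≥ 6000 then "Grandmaster" else if p ≥ 5000 then "Master"
      else if p ≥ 4000 then "Diamond" else if p ≥ 3000 then "Platinum"
      else if p ≥ 2000 then "Gold" else if p ≥ 1000 then "Silver"
      else if p ≥ 0 then "Bronze" else "Unranked" := by
  have hs : PySem.List.sorted
      (PySem.Dict.ofList
        [((0:Int), "Bronze"), (1000, "Silver"), (2000, "Gold"),
         (3000, "Platinum"), (4000, "Diamond"),
         (5000, "Master"), (6000, "Grandmaster")]).items (fun kv => kv.1) true =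
      [((6000:Int), "Grandmaster"), (5000, "Master"), (4000, "Diamond"),
       (3000, "Platinum"), (2000, "Gold"), (1000, "Silver"), (0, "Bronze")] := by
    decide
  simp only [get_rank_name, hs, rankLoop]

theorem get_rank_name_spec : Claim_equal_get_rank_name := by
  intro p _
  unfold Spec_get_rank_name
  rw [getA]
  unfold get_rank_name_alt
  by_cases hneg : p < 0
  · simp only [if_pos hneg]
    have h0 : ¬ p ≥ 0 := by omega
    simp [h0, show ¬ p ≥ 6000 by omega, show ¬ p ≥ 5000 by omega,
      show ¬ p ≥ 4000 by omega, show ¬ p ≥ 3000 by omega,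
      show ¬ p ≥ 2000 by omega, show ¬ p ≥ 1000 by omega]
  · simp only [if_neg hneg]
    rw [not_lt] at hneg
    by_cases h7 : p ≥ 7000
    · have hq : (7:Int) ≤ PySem.Int.floordiv p 1000 := by
        rw [PySem.Int.le_floordiv_iff_mul_le (by omega : (0:Int) < 1000)]
        omega
      have hgt : PySem.Int.floordiv p 1000 > 6 := by omega
      simp only [if_pos hgt]
      simp [PySem.List.pyGet?, PySem.List.pyIdx?, show p ≥ 6000 by omega]
    · rw [not_le] at h7
      -- p ∈ [0, 7000): name the band k containing p
      have h := (PySem.Int.floordiv_eq_iff_of_pos (a := p) (b := 1000)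
        (q := PySem.Int.floordiv p 1000) (by omega)).mp rfl
      have hk0 : 0 ≤ PySem.Int.floordiv p 1000 := by omega
      have hk6 : PySem.Int.floordiv p 1000 ≤ 6 := by omega
      set k := PySem.Int.floordiv p 1000 with hkdef
      clear_value k
      interval_cases k <;>
        norm_num [PySem.List.pyGet?, PySem.List.pyIdx?] <;>
        (try split_ifs) <;> first | rfl | omega
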